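-- pv_equiv track=rewrite | github.com/ADavidBailey/Practice-Bidding-Scenarios | docs/generateDashboardData.py | aggregate_events_by_month
-- ===== SOURCE A (Python) =====
-- from collections import defaultdict
--
-- def aggregate_events_by_month(events, type_filter=None):
--     """Aggregate events by month (YYYY-MM format)"""
--     monthly = defaultdict(int)
--     for event in events:
--         if type_filter and event.get('type') != type_filter:
--             continue
--         ts = event.get('timestamp', '')
--         if ts:
--             month = ts[:7]  # "2026-01"
--             monthly[month] += 1
--     return dict(sorted(monthly.items()))
-- ===== SOURCE B (Python) =====
-- def aggregate_events_by_month(events, type_filter=None):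
--     """Aggregate events by month (YYYY-MM format): sort-then-scan run-length counting."""
--     months = []
--     for event in events:
--         if type_filter and event.get('type') != type_filter:
--             continue
--         ts = event.get('timestamp', '')
--         if ts:
--             months.append(ts[:7])
--     months.sort()
--     result = {}
--     i, n = 0, len(months)
--     while i < n:
--         m = months[i]
--         j = i + 1
--         while j < n and months[j] == m:
--             j += 1
--         result[m] = j - i
--         i = j
--     return result
-- ===== Notes on version B (the rewrite author's own statement) =====
-- stated objective: alternative
-- what changed: Replaces A's defaultdict tally followed by sorting the items with a sort-then-scan strategy: B collects the filtered month strings into a list, sorts it, and counts consecutive runs with an index scan, building the result directly in sorted order.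
import Mathlib
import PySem

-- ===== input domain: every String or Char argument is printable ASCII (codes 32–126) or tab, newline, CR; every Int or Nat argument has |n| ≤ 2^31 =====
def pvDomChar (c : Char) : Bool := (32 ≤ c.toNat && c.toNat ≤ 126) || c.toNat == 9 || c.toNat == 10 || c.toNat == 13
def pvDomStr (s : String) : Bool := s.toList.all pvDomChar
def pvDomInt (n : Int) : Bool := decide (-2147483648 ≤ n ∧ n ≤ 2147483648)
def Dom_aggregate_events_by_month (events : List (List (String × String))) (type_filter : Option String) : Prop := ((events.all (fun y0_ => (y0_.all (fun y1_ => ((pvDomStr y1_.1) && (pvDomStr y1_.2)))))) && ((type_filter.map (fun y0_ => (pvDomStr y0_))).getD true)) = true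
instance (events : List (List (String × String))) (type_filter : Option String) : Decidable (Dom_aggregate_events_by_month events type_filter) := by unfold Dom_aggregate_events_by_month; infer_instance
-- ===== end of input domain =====

-- B replaces A's defaultdict tally + item sort by collecting the filtered months into a
-- list, sorting it, and run-length counting consecutive equal months (alternative algorithm,
-- similar cost). Equivalence of RETURN values is proved on the whole domain (A is total).

-- ===== PORT A =====
def aggregate_events_by_month (events : List (List (String × String))) (type_filter : Option String) : List (String × Int) :=
  let monthly := events.foldl (fun monthly event =>
    if (match type_filter with | none => false | some s => !(s == "")) &&
       (List.lookup "type" event != type_filter) then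
      monthly
    else
      let ts := (List.lookup "timestamp" event).getD ""
      if ts ≠ "" then monthly.modify (PySem.Str.slice ts none (some 7)) 0 (· + 1) else monthly)
    PySem.Dict.empty
  -- dict keys are distinct, so Python's tuple comparison in sorted(monthly.items()) is the
  -- lexicographic order on the pairs: ported with sorted2 on (fst, snd), the tuple key.
  PySem.List.sorted2 monthly.items (fun p => p.1) (fun p => p.2)

-- ===== PORT B =====
-- run-length counting scan over the sorted month list (the two nested index `while` loops:
-- the inner loop consuming a run is takeWhile/dropWhile on the rest of the list)
def pvRuns : List String → List (String × Int)
  | [] => []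
  | x :: xs =>
      (x, 1 + ((xs.takeWhile (· == x)).length : Int)) :: pvRuns (xs.dropWhile (· == x))
termination_by s => s.length
decreasing_by simpa using Nat.lt_succ_of_le (List.length_dropWhile_le _ _)

def aggregate_events_by_month_alt (events : List (List (String × String))) (type_filter : Option String) : List (String × Int) :=
  let months := events.foldl (fun months event =>
    if (match type_filter with | none => false | some s => !(s == "")) &&
       (List.lookup "type" event != type_filter) then
      months
    else
      let ts := (List.lookup "timestamp" event).getD ""
      if ts ≠ "" then months ++ [PySem.Str.slice ts none (some 7)] else months) []
  pvRuns (PySem.List.sorted months (fun x => x))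

-- ===== PRECONDITION & SPEC =====
def Spec_aggregate_events_by_month (events : List (List (String × String))) (type_filter : Option String) (out : List (String × Int)) : Prop := out = aggregate_events_by_month_alt events type_filter
instance (events : List (List (String × String))) (type_filter : Option String) (out : List (String × Int)) : Decidable (Spec_aggregate_events_by_month events type_filter out) := by unfold Spec_aggregate_events_by_month; infer_instance

-- ===== CLAIM (what is proved, stated in full; the proofs are below) =====
def Claim_equal_aggregate_events_by_month : Prop := ∀ (events : List (List (String × String))) (type_filter : Option String), Dom_aggregate_events_by_month events type_filter → Spec_aggregate_events_by_month events type_filter (aggregate_events_by_month events type_filter)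

-- ===== LEMMAS AND PROOFS =====

-- the month contributed by one event (shared characterisation of both ports' per-event step)
def pvMonth? (type_filter : Option String) (event : List (String × String)) : Option String :=
  if (match type_filter with | none => false | some s => !(s == "")) &&
     (List.lookup "type" event != type_filter) then
    none
  else
    let ts := (List.lookup "timestamp" event).getD ""
    if ts ≠ "" then some (PySem.Str.slice ts none (some 7)) else none

theorem pv_foldl_optStep_modify (type_filter : Option String)
    (l : List (List (String × String))) (d : PySem.Dict String Int) :
    l.foldl (fun d e => match pvMonth? type_filter e with
              | some m => d.modify m 0 (· + 1) | none => d) d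
      = (l.filterMap (pvMonth? type_filter)).foldl (fun d x => d.modify x 0 (· + 1)) d := by
  induction l generalizing d with
  | nil => rfl
  | cons e l ih =>
      simp only [List.foldl_cons, List.filterMap_cons]
      cases pvMonth? type_filter e <;> simp [ih]

theorem pv_foldl_optStep_append (type_filter : Option String)
    (l : List (List (String × String))) (acc : List String) :
    l.foldl (fun acc e => match pvMonth? type_filter e with
              | some m => acc ++ [m] | none => acc) acc
      = acc ++ l.filterMap (pvMonth? type_filter) := by
  induction l generalizing acc with
  | nil => simp
  | cons e l ih =>
      simp only [List.foldl_cons, List.filterMap_cons]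
      cases pvMonth? type_filter e <;> simp [ih]

theorem pv_stepA (type_filter : Option String) (d : PySem.Dict String Int)
    (event : List (String × String)) :
    (if (match type_filter with | none => false | some s => !(s == "")) &&
        (List.lookup "type" event != type_filter) then d
     else
       let ts := (List.lookup "timestamp" event).getD ""
       if ts ≠ "" then d.modify (PySem.Str.slice ts none (some 7)) 0 (· + 1) else d)
      = match pvMonth? type_filter event with
        | some m => d.modify m 0 (· + 1)
        | none => d := by
  unfold pvMonth?
  split_ifs with h
  · rfl
  · by_cases h2 : ((List.lookup "timestamp" event).getD "") ≠ "" <;> simp [h2]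

theorem pv_stepB (type_filter : Option String) (acc : List String)
    (event : List (String × String)) :
    (if (match type_filter with | none => false | some s => !(s == "")) &&
        (List.lookup "type" event != type_filter) then acc
     else
       let ts := (List.lookup "timestamp" event).getD ""
       if ts ≠ "" then acc ++ [PySem.Str.slice ts none (some 7)] else acc)
      = match pvMonth? type_filter event with
        | some m => acc ++ [m]
        | none => acc := by
  unfold pvMonth?
  split_ifs with h
  · rfl
  · by_cases h2 : ((List.lookup "timestamp" event).getD "") ≠ "" <;> simp [h2]

theorem pv_A_eq_sorted_counter (events : List (List (String × String))) (type_filter : Option String) :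
    aggregate_events_by_month events type_filter
      = PySem.List.sorted2 (PySem.Dict.counter (events.filterMap (pvMonth? type_filter))).items
          (fun p => p.1) (fun p => p.2) := by
  unfold aggregate_events_by_month
  rw [show (fun (monthly : PySem.Dict String Int) (event : List (String × String)) =>
        if (match type_filter with | none => false | some s => !(s == "")) &&
           (List.lookup "type" event != type_filter) then monthly
        else
          let ts := (List.lookup "timestamp" event).getD ""
          if ts ≠ "" then monthly.modify (PySem.Str.slice ts none (some 7)) 0 (· + 1) else monthly)
      = fun monthly event => match pvMonth? type_filter event with
          | some m => monthly.modify m 0 (· + 1) | none => monthly from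
        funext fun d => funext fun e => pv_stepA type_filter d e]
  rw [pv_foldl_optStep_modify, ← PySem.Dict.counter_eq_foldl]

theorem pv_B_months (events : List (List (String × String))) (type_filter : Option String) :
    aggregate_events_by_month_alt events type_filter
      = pvRuns (PySem.List.sorted (events.filterMap (pvMonth? type_filter)) (fun x => x)) := by
  unfold aggregate_events_by_month_alt
  rw [show (fun (months : List String) (event : List (String × String)) =>
        if (match type_filter with | none => false | some s => !(s == "")) &&
           (List.lookup "type" event != type_filter) then months
        else
          let ts := (List.lookup "timestamp" event).getD ""
          if ts ≠ "" then months ++ [PySem.Str.slice ts none (some 7)] else months)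
      = fun months event => match pvMonth? type_filter event with
          | some m => months ++ [m] | none => months from funext fun a => funext fun e => pv_stepB type_filter a e]
  rw [pv_foldl_optStep_append]
  simp

-- sorted2 with keys (fst, snd) is sorting by the lexicographic pair key
theorem pv_sorted2_eq_sorted_lex (xs : List (String × Int)) :
    PySem.List.sorted2 xs (fun p => p.1) (fun p => p.2)
      = PySem.List.sorted xs (fun p => toLex (p.1, p.2)) := by
  rw [PySem.List.sorted_eq_foldl_insertBy]
  show List.foldl (fun acc p => PySem.List.insertBy
      (fun a b => decide (a.1 < b.1) || (!decide (b.1 < a.1) && decide (a.2 < b.2))) p acc) [] xs = _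
  rw [show (fun (a b : String × Int) => decide (a.1 < b.1) || (!decide (b.1 < a.1) && decide (a.2 < b.2)))
      = (fun (a b : String × Int) => decide (toLex (a.1, a.2) < toLex (b.1, b.2))) from ?_]
  funext a b
  by_cases h1 : a.1 < b.1 <;> by_cases h2 : b.1 < a.1
  · exact absurd h2 (lt_asymm h1)
  · simp [h1, h2, Prod.Lex.lt_iff]
  · simp only [Prod.Lex.lt_iff]
    simp [h1, h2]
    intro h; exact absurd (h ▸ h2) (lt_irrefl _)
  · have hEq : a.1 = b.1 := le_antisymm (not_lt.mp h2) (not_lt.mp h1)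
    simp [hEq, Prod.Lex.lt_iff]

-- every element past the leading run of x is strictly greater than x (sorted input)
theorem pv_dropWhile_gt (x : String) :
    ∀ (xs : List String), xs.Pairwise (· ≤ ·) → (∀ y ∈ xs, x ≤ y) →
      ∀ z ∈ xs.dropWhile (· == x), x < z := by
  intro xs
  induction xs with
  | nil => intro _ _ z hz; simp [List.dropWhile] at hz
  | cons a l ih =>
      intro hp hx z hz
      rw [List.dropWhile_cons] at hz
      by_cases ha : a == x
      · simp [ha] at hz
        exact ih hp.of_cons (fun y hy => hx y (List.mem_cons_of_mem _ hy)) z hz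
      · simp [ha] at hz
        have hax : x < a :=
          lt_of_le_of_ne (hx a (List.mem_cons_self)) (fun h => ha (by simp [h.symm]))
        rcases hz with rfl | hz
        · exact hax
        · exact lt_of_lt_of_le hax (List.rel_of_pairwise_cons hp hz)

-- run-length scan of a sorted list: keys strictly increase, and each pair is (k, count k s)
theorem pv_runs_spec :
    ∀ (s : List String), s.Pairwise (· ≤ ·) →
      (pvRuns s).Pairwise (fun a b => a.1 < b.1) ∧
      (∀ p : String × Int, p ∈ pvRuns s ↔ p.1 ∈ s ∧ p.2 = (s.count p.1 : Int)) := by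
  intro s
  induction s using pvRuns.induct with
  | case1 => intro _; simp [pvRuns]
  | case2 x xs ih =>
      intro hp
      have hx : ∀ y ∈ xs, x ≤ y := fun y hy => List.rel_of_pairwise_cons hp hy
      have hgt : ∀ z ∈ xs.dropWhile (· == x), x < z :=
        pv_dropWhile_gt x xs hp.of_cons hx
      have hd : (xs.dropWhile (· == x)).Pairwise (· ≤ ·) :=
        hp.of_cons.sublist (List.dropWhile_sublist _)
      obtain ⟨ihp, ihm⟩ := ih hd
      have hsplit : xs.takeWhile (· == x) ++ xs.dropWhile (· == x) = xs :=
        List.takeWhile_append_dropWhile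
      have htake : ∀ y ∈ xs.takeWhile (· == x), y = x := by
        intro y hy
        have := List.mem_takeWhile_imp hy
        simpa using this
      have hcount_take : (xs.takeWhile (· == x)).count x = (xs.takeWhile (· == x)).length := by
        apply List.count_eq_length.mpr
        intro y hy; simpa using (htake y hy).symm
      have hcount_drop : (xs.dropWhile (· == x)).count x = 0 :=
        List.count_eq_zero.mpr (fun h => lt_irrefl x (hgt x h))
      have hxcount : (xs.count x : Int) = ((xs.takeWhile (· == x)).length : Int) := by
        rw [← hsplit, List.count_append, hcount_take, hcount_drop]; simp
      have hmem : ∀ p : String × Int,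
          p ∈ pvRuns (x :: xs) ↔ p.1 ∈ x :: xs ∧ p.2 = ((x :: xs).count p.1 : Int) := by
        intro p
        simp only [pvRuns, List.mem_cons]
        constructor
        · rintro (rfl | hpmem)
          · refine ⟨Or.inl rfl, ?_⟩
            simp [hxcount]
            ring
          · obtain ⟨hp1, hp2⟩ := (ihm p).mp hpmem
            have hlt := hgt p.1 hp1
            have hne : p.1 ≠ x := fun h => lt_irrefl x (h ▸ hlt)
            have hp1' : p.1 ∈ xs := (List.dropWhile_sublist _).mem hp1
            refine ⟨Or.inr hp1', ?_⟩
            have htc : (xs.takeWhile (· == x)).count p.1 = 0 :=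
              List.count_eq_zero.mpr (fun h => hne (htake _ h))
            have hcnt : xs.count p.1 = (xs.dropWhile (· == x)).count p.1 := by
              conv_lhs => rw [← hsplit]
              rw [List.count_append, htc, Nat.zero_add]
            rw [hp2]
            simp [hcnt, Ne.symm hne]
        · rintro ⟨hp1, hp2⟩
          by_cases hne : p.1 = x
          · left
            have h2 : p.2 = 1 + ((xs.takeWhile (· == x)).length : Int) := by
              rw [hp2, hne]
              simp [hxcount]
              ring
            exact Prod.ext hne h2
          · right
            apply (ihm p).mpr
            have hp1'' : p.1 ∈ xs := hp1.resolve_left hne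
            have hin : p.1 ∈ xs.dropWhile (· == x) := by
              rw [← hsplit] at hp1''
              rcases List.mem_append.mp hp1'' with h | h
              · exact absurd (htake _ h) hne
              · exact h
            refine ⟨hin, ?_⟩
            have htc : (xs.takeWhile (· == x)).count p.1 = 0 :=
              List.count_eq_zero.mpr (fun h => hne (htake _ h))
            have hcnt : xs.count p.1 = (xs.dropWhile (· == x)).count p.1 := by
              conv_lhs => rw [← hsplit]
              rw [List.count_append, htc, Nat.zero_add]
            rw [hp2]
            simp [hcnt, Ne.symm hne]
      refine ⟨?_, hmem⟩
      · rw [pvRuns]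
        refine List.pairwise_cons.mpr ⟨?_, ihp⟩
        intro p hpmem
        exact hgt p.1 ((ihm p).mp hpmem).1

theorem pv_main (events : List (List (String × String))) (type_filter : Option String) :
    aggregate_events_by_month events type_filter = aggregate_events_by_month_alt events type_filter := by
  rw [pv_A_eq_sorted_counter, pv_B_months, pv_sorted2_eq_sorted_lex]
  set months := events.filterMap (pvMonth? type_filter) with hm
  set s := PySem.List.sorted months (fun x => x) with hs
  have hsp : s.Pairwise (· ≤ ·) := PySem.List.sorted_pairwise months (fun x => x)
  have hperm_s : s.Perm months := PySem.List.sorted_perm months (fun x => x) false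
  obtain ⟨hruns_pair, hruns_mem⟩ := pv_runs_spec s hsp
  apply PySem.List.sorted_eq_of_perm_of_pairwise_lt
  · -- (pvRuns s).Perm (counter months).items
    rw [PySem.Dict.items_counter]
    have hnodup_runs : (pvRuns s).Nodup :=
      (hruns_pair.imp (fun h => by exact fun he => absurd (congrArg Prod.fst he) (ne_of_lt h)))
    have hnodup_items :
        ((PySem.Set.ofList months).map (fun k => (k, (months.count k : Int)))).Nodup := by
      apply List.Nodup.map (fun a b h => (Prod.mk.injEq _ _ _ _ ▸ h).1)
      exact PySem.Set.nodup_ofList months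
    apply (List.perm_ext_iff_of_nodup hnodup_runs hnodup_items).mpr
    intro p
    rw [hruns_mem p, List.mem_map]
    constructor
    · rintro ⟨hp1, hp2⟩
      refine ⟨p.1, ?_, ?_⟩
      · exact (PySem.Set.mem_ofList months p.1).mpr (hperm_s.mem_iff.mp hp1)
      · rw [← hperm_s.count_eq p.1, ← hp2]
    · rintro ⟨k, hk, rfl⟩
      have hk' : k ∈ months := (PySem.Set.mem_ofList months k).mp hk
      exact ⟨hperm_s.mem_iff.mpr hk', by rw [hperm_s.count_eq k]⟩
  · -- keys strictly increase ⇒ lexicographic pair keys strictly increase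
    exact hruns_pair.imp (fun h => Prod.Lex.lt_iff.mpr (Or.inl h))

-- ===== VERDICT (by name: the statement is the Claim_ definition above) =====
theorem aggregate_events_by_month_spec : Claim_equal_aggregate_events_by_month := by
  intro events type_filter _
  unfold Spec_aggregate_events_by_month
  exact pv_main events type_filter
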